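-- pv_equiv track=rewrite | github.com/chengjunyan1/GN-Transformer-AST | preprocess/Java/process.py | expand_subword
-- ===== SOURCE A (Python) =====
-- def expand_subword(words,wtype,ginit):
--     new_coord={}
--     new_words=[]
--     new_wtype=[]
--     new_ginit=[]
--     offset=0
--     for i in range(len(words)):
--         new_coord[i]=[j+offset for j in range(len(words[i]))]
--         new_words+=words[i]
--         for j in range(len(words[i])): new_wtype.append(wtype[i])
--         offset+=len(words[i])
--     for n in ginit:
--         giniti=[]
--         for j in n: giniti+=new_coord[j]
--         new_ginit.append(giniti)
--     return new_words,new_wtype,new_ginit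
-- ===== SOURCE B (Python) =====
-- def expand_subword(words, wtype, ginit):
--     new_words = sum(words, [])
--     new_wtype = sum(([t] * len(w) for w, t in zip(words, wtype)), [])
--
--     def span(j):
--         start = sum(len(w) for w in words[:j])
--         return list(range(start, start + len(words[j])))
--
--     new_ginit = [sum((span(j) for j in n), []) for n in ginit]
--     return new_words, new_wtype, new_ginit
-- ===== Notes on version B (the rewrite author's own statement) =====
-- stated objective: alternative
-- what changed: B is a stateless declarative formulation: no coordinate dict and no running-offset accumulator; each group's flattened span is recomputed on demand as range(sum(len(w) for w in words[:j]), ...) and all three outputs are built by sum()-concatenation of comprehensions instead of A's two-phase stateful loops.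
import Mathlib
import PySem

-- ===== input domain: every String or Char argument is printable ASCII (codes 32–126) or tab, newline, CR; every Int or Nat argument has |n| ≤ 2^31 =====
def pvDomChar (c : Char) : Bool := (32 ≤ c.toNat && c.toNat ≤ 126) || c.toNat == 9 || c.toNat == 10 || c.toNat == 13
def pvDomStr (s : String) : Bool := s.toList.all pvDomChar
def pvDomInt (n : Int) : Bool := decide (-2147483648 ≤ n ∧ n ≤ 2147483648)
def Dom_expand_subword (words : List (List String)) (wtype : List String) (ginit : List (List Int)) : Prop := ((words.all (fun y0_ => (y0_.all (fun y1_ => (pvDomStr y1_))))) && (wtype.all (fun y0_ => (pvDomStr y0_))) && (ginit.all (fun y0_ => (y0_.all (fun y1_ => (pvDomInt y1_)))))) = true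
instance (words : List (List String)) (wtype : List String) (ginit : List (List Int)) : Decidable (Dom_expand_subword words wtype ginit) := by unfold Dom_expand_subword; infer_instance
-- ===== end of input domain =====

-- B drops A's coordinate dict and offset accumulator: it recomputes each group's flattened
-- span on demand from prefix length sums; alternative stateless decomposition, same output.

-- ===== PORT A =====
-- the body of A's first loop (state: new_coord, new_words, new_wtype, offset)
def stepA (words : List (List String)) (wtype : List String)
    (st : PySem.Dict Int (List Int) × List String × List String × Int) (i : Nat) :
    PySem.Dict Int (List Int) × List String × List String × Int :=
  (st.1.insert (i : Int)
      ((PySem.List.pyRange 0 (((words.getD i []).length : Int)) 1).map (fun j => j + st.2.2.2)),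
   st.2.1 ++ words.getD i [],
   (List.range (words.getD i []).length).foldl (fun acc _ => acc ++ [wtype.getD i ""]) st.2.2.1,
   st.2.2.2 + ((words.getD i []).length : Int))

def expand_subword (words : List (List String)) (wtype : List String) (ginit : List (List Int)) :
    List String × List String × List (List Int) :=
  let st := (List.range words.length).foldl (stepA words wtype) (PySem.Dict.empty, [], [], 0)
  let new_ginit := ginit.foldl (fun acc n =>
    acc ++ [n.foldl (fun g j => g ++ (st.1.get? j).getD []) []]) []
  (st.2.1, st.2.2.1, new_ginit)

-- ===== PORT B =====
-- span(j): start = sum(len(w) for w in words[:j]); list(range(start, start+len(words[j])))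
-- (words[j] would raise in Python outside Pre_; the port totalises it with getD [])
def spanB (words : List (List String)) (j : Int) : List Int :=
  let start := ((PySem.List.slice words none (some j)).map (fun w => (w.length : Int))).sum
  PySem.List.pyRange start (start + (((PySem.List.pyGet? words j).getD []).length : Int)) 1

def expand_subword_alt (words : List (List String)) (wtype : List String) (ginit : List (List Int)) :
    List String × List String × List (List Int) :=
  (words.foldl (fun acc w => acc ++ w) [],
   (words.zip wtype).foldl (fun acc p => acc ++ List.replicate p.1.length p.2) [],
   ginit.map (fun n => n.foldl (fun acc j => acc ++ spanB words j) []))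

-- ===== PRECONDITION & SPEC =====
-- Pre_ excludes exactly the inputs where A raises: an IndexError on wtype when some nonempty
-- group i has i ≥ len(wtype), and a KeyError when ginit mentions a group index outside 0..len(words)-1.
def Pre_expand_subword (words : List (List String)) (wtype : List String) (ginit : List (List Int)) : Prop :=
  (∀ i < words.length, words.getD i [] ≠ [] → i < wtype.length) ∧
  (∀ n ∈ ginit, ∀ j ∈ n, 0 ≤ j ∧ j < (words.length : Int))
instance (words : List (List String)) (wtype : List String) (ginit : List (List Int)) : Decidable (Pre_expand_subword words wtype ginit) := by unfold Pre_expand_subword; infer_instance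

def pvWitness_expand_subword : List (List String) × List String × List (List Int) :=
  ([["ab", "c"], ["d"]], ["x", "y"], [[0, 1], [1]])

def Spec_expand_subword (words : List (List String)) (wtype : List String) (ginit : List (List Int)) (out : List String × List String × List (List Int)) : Prop := out = expand_subword_alt words wtype ginit
instance (words : List (List String)) (wtype : List String) (ginit : List (List Int)) (out : List String × List String × List (List Int)) : Decidable (Spec_expand_subword words wtype ginit out) := by unfold Spec_expand_subword; infer_instance

-- ===== CLAIM (what is proved, stated in full; the proofs are below) =====
def Claim_equal_expand_subword : Prop := ∀ (words : List (List String)) (wtype : List String) (ginit : List (List Int)), Dom_expand_subword words wtype ginit → Pre_expand_subword words wtype ginit → Spec_expand_subword words wtype ginit (expand_subword words wtype ginit)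

-- ===== LEMMAS AND PROOFS =====

-- sum of the lengths of the first k groups (the flattened offset of group k)
def sumTake (ws : List (List String)) (k : Nat) : Int :=
  ((ws.take k).map (fun w => (w.length : Int))).sum

-- the coordinate list A stores for group i
def valA (words : List (List String)) (i : Nat) : List Int :=
  (PySem.List.pyRange 0 (((words.getD i []).length : Int)) 1).map (fun j => j + sumTake words i)

def coordD (words : List (List String)) (m : Nat) : PySem.Dict Int (List Int) :=
  (List.range m).foldl (fun d (i : Nat) => d.insert (i : Int) (valA words i)) PySem.Dict.empty

def wtT (words : List (List String)) (wtype : List String) (m : Nat) : List String :=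
  (List.range m).flatMap (fun i => (words.getD i []).map (fun _ => wtype.getD i ""))

theorem sumTake_succ (ws : List (List String)) (k : Nat) :
    sumTake ws (k + 1) = sumTake ws k + ((ws.getD k []).length : Int) := by
  cases h : ws[k]? with
  | none => simp [sumTake, List.take_add_one, h, List.getD_eq_getElem?_getD]
  | some w => simp [sumTake, List.take_add_one, h, List.getD_eq_getElem?_getD]

theorem flatten_take_succ (ws : List (List String)) (k : Nat) :
    (ws.take (k + 1)).flatten = (ws.take k).flatten ++ ws.getD k [] := by
  cases h : ws[k]? with
  | none => simp [List.take_add_one, h, List.getD_eq_getElem?_getD]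
  | some w => simp [List.take_add_one, h, List.getD_eq_getElem?_getD]

theorem coordD_succ (words : List (List String)) (m : Nat) :
    coordD words (m + 1) = (coordD words m).insert (m : Int) (valA words m) := by
  unfold coordD
  rw [List.range_succ, List.foldl_append]
  simp

theorem foldA (words : List (List String)) (wtype : List String) (m : Nat) :
    (List.range m).foldl (stepA words wtype) (PySem.Dict.empty, [], [], 0) =
      (coordD words m, (words.take m).flatten, wtT words wtype m, sumTake words m) := by
  induction m with
  | zero => simp [coordD, wtT, sumTake]
  | succ m ih =>
    rw [List.range_succ, List.foldl_append, ih]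
    simp only [List.foldl_cons, List.foldl_nil, stepA]
    refine Prod.ext ?_ (Prod.ext ?_ (Prod.ext ?_ ?_))
    · simp [coordD_succ, valA]
    · simp [flatten_take_succ]
    · rw [PySem.List.foldl_append_singleton_eq_map]
      unfold wtT
      rw [List.range_succ, List.flatMap_append]
      simp [List.map_const']
    · simp [sumTake_succ]

theorem get?_coordD (words : List (List String)) (m : Nat) (j : Int) :
    (coordD words m).get? j =
      if 0 ≤ j ∧ j < (m : Int) then some (valA words j.toNat) else none := by
  induction m with
  | zero =>
    simp only [coordD, List.range_zero, List.foldl_nil, PySem.Dict.get?_empty]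
    split_ifs with h
    · omega
    · rfl
  | succ m ih =>
    rw [coordD_succ, PySem.Dict.get?_insert, ih]
    by_cases hj : j = (m : Int)
    · subst hj
      simp
    · simp only [if_neg hj]
      split_ifs with h1 h2 h2 <;> first | rfl | omega

theorem wtT_eq_zip (ws : List (List String)) (wt : List String)
    (h : ∀ i < ws.length, ws.getD i [] ≠ [] → i < wt.length) :
    wtT ws wt ws.length = (ws.zip wt).flatMap (fun p => p.1.map (fun _ => p.2)) := by
  induction ws generalizing wt with
  | nil => simp [wtT]
  | cons w ws ih =>
    have hshift : wtT (w :: ws) wt (ws.length + 1) =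
        w.map (fun _ => wt.getD 0 "") ++ wtT ws wt.tail ws.length := by
      unfold wtT
      rw [List.range_succ_eq_map]
      simp only [List.flatMap_cons, List.flatMap_map]
      congr 1
      apply List.flatMap_congr
      intro i _
      simp
    rw [List.length_cons, hshift]
    cases wt with
    | nil =>
      have hw : w = [] := by
        by_contra hne
        have h0 := h 0 (by simp) (by simpa using hne)
        simp at h0
      subst hw
      simp only [List.zip_nil_right, List.flatMap_nil, List.map_nil, List.nil_append]
      rw [ih]
      · simp
      · intro i hi hne
        have h1 := h (i + 1) (by simpa using Nat.succ_lt_succ hi) (by simpa using hne)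
        simp at h1
    | cons t wt' =>
      simp only [List.zip_cons_cons, List.flatMap_cons, List.getD_cons_zero, List.tail_cons]
      congr 1
      apply ih
      intro i hi hne
      have h1 := h (i + 1) (by simpa using Nat.succ_lt_succ hi) (by simpa using hne)
      simpa using h1

theorem valA_eq_pyRange (words : List (List String)) (k : Nat) :
    valA words k = PySem.List.pyRange (sumTake words k) (sumTake words (k + 1)) 1 := by
  rw [sumTake_succ]
  unfold valA
  rw [PySem.List.pyRange_one, PySem.List.pyRange_one]
  have h1 : ((words.getD k []).length : Int) - 0 = ((words.getD k []).length : Int) := by ring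
  have h2 : sumTake words k + ((words.getD k []).length : Int) - sumTake words k =
      ((words.getD k []).length : Int) := by ring
  rw [h1, h2, Int.toNat_natCast, List.map_map]
  apply List.map_congr_left
  intro t _
  simp [Function.comp]
  ring

theorem foldl_append_flatten (l : List (List String)) (acc : List String) :
    l.foldl (fun a w => a ++ w) acc = acc ++ l.flatten := by
  induction l generalizing acc with
  | nil => simp
  | cons w ws ih => simp [ih]

theorem spanB_eq_valA (words : List (List String)) (j : Int)
    (h0 : 0 ≤ j) (hlt : j < (words.length : Int)) :
    spanB words j = valA words j.toNat := by
  simp only [spanB]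
  rw [PySem.List.slice_to words h0]
  rw [PySem.List.pyGet?_eq_some_getElem words h0 hlt, Option.getD_some]
  have hget : words[j.toNat] = words.getD j.toNat [] := by
    rw [List.getD_eq_getElem?_getD, List.getElem?_eq_getElem (by omega)]
    rfl
  rw [hget, valA_eq_pyRange, sumTake_succ]
  rfl

-- ===== VERDICT (by name: the statement is the Claim_ definition above) =====
theorem expand_subword_spec : Claim_equal_expand_subword := by
  intro words wtype ginit _hDom hPre
  unfold Spec_expand_subword expand_subword expand_subword_alt
  rw [foldA]
  simp only
  refine Prod.ext ?_ (Prod.ext ?_ ?_)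
  · rw [foldl_append_flatten]
    simp
  · rw [PySem.List.foldl_append_eq_flatMap, List.nil_append]
    have := wtT_eq_zip words wtype hPre.1
    simp only [List.map_const'] at this
    simpa using this
  · rw [PySem.List.foldl_append_singleton_eq_map]
    simp only [List.nil_append]
    apply List.map_congr_left
    intro n hn
    rw [PySem.List.foldl_append_eq_flatMap, PySem.List.foldl_append_eq_flatMap]
    simp only [List.nil_append]
    apply List.flatMap_congr
    intro j hj
    obtain ⟨hj0, hjlt⟩ := hPre.2 n hn j hj
    rw [get?_coordD, if_pos ⟨hj0, by omega⟩, Option.getD_some, spanB_eq_valA words j hj0 hjlt]
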